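-- pv_equiv track=rewrite | github.com/DongHyun222/Coding-Test | PCCP/모의고사2번.py | solution
-- ===== SOURCE A (Python) =====
-- import heapq
--
-- def solution(ability, number):          #이진힙을 통해 최소값 찾기
--     answer = 0
--     pQ = []
--     for x in ability:
--         heapq.heappush(pQ,x)
--
--     for _ in range(number):             #최소값 두개 뽑아내서 합친후 다시 푸시
--         min1 = heapq.heappop(pQ)
--         min2 = heapq.heappop(pQ)
--         heapq.heappush(pQ, min1+min2)
--         heapq.heappush(pQ, min1+min2)
--
--     answer = sum(pQ)
--     return answer
-- ===== SOURCE B (Python) =====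
-- def solution(ability, number):
--     # Keep the pool as a sorted list instead of a binary heap: sort once,
--     # take the two smallest from the front, splice the sum back in twice
--     # at its ordered position.
--     pool = sorted(ability)
--     for _ in range(number):
--         s = pool[0] + pool[1]
--         rest = pool[2:]
--         i = 0
--         while i < len(rest) and rest[i] < s:
--             i += 1
--         pool = rest[:i] + [s, s] + rest[i:]
--     return sum(pool)
-- ===== Notes on version B (the rewrite author's own statement) =====
-- stated objective: alternative
-- what changed: Replaces the binary heap (heapq push/pop with sift operations) by a pool kept as a sorted list: sort once, take the two smallest from the front, splice their sum back in twice at its ordered position.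
import Mathlib
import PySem

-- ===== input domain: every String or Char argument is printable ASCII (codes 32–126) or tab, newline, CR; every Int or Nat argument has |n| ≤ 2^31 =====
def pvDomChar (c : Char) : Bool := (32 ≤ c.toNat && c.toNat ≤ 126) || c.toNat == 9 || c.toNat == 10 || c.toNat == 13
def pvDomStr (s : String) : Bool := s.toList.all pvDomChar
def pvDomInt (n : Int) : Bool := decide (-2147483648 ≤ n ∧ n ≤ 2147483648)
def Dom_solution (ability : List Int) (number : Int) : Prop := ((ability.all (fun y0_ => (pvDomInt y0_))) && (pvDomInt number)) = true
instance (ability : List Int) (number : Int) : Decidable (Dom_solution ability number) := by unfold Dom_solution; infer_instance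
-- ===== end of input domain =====

-- B keeps the pool as a sorted list (sort once, splice sums back in order) instead of A's binary heap; alternative data structure, return value proved equal on Pre_.

-- ===== PORT A =====
-- hand port of CPython heapq (_siftdown, _siftup, heappush, heappop) on List Int; exact step for step,
-- indices via getD/set (all accesses A performs are in range on inputs admitted by Pre_).
-- fuel only makes the while-loop total; pos strictly decreases, so fuel = pos always suffices
-- and the fuel-0 case coincides with the loop-exit case (startpos < pos is impossible there).
def siftdownGo : Nat → List Int → Nat → Nat → Int → List Int
  | 0, heap, _, pos, newitem => heap.set pos newitem
  | fuel + 1, heap, startpos, pos, newitem =>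
    if startpos < pos then
      let parentpos := (pos - 1) / 2
      let parent := heap.getD parentpos 0
      if newitem < parent then
        siftdownGo fuel (heap.set pos parent) startpos parentpos newitem
      else heap.set pos newitem
    else heap.set pos newitem

-- fuel = heap.length suffices (heap.length - pos strictly decreases); the fuel-0 case
-- coincides with the loop-exit case (2*pos+1 < heap.length is impossible there).
def siftupGo : Nat → List Int → Nat → Nat → Int → List Int
  | 0, heap, startpos, pos, newitem => siftdownGo pos (heap.set pos newitem) startpos pos newitem
  | fuel + 1, heap, startpos, pos, newitem =>
    if 2 * pos + 1 < heap.length then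
      let childpos := 2 * pos + 1
      let childpos' := if childpos + 1 < heap.length ∧ ¬ (heap.getD childpos 0 < heap.getD (childpos + 1) 0) then childpos + 1 else childpos
      siftupGo fuel (heap.set pos (heap.getD childpos' 0)) startpos childpos' newitem
    else siftdownGo pos (heap.set pos newitem) startpos pos newitem

-- heap.append(item); _siftdown(heap, 0, len(heap)-1)
def heappush (heap : List Int) (item : Int) : List Int :=
  siftdownGo ((heap ++ [item]).length - 1) (heap ++ [item]) 0 ((heap ++ [item]).length - 1) item

-- lastelt = heap.pop(); if heap: returnitem = heap[0]; heap[0] = lastelt; _siftup(heap, 0); …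
-- (on an empty heap Python raises IndexError; Pre_ excludes that, the port returns junk (0, []))
def heappop (heap : List Int) : Int × List Int :=
  match heap.getLast? with
  | none => (0, [])
  | some lastelt =>
    let h := heap.dropLast
    if h.length > 0 then
      let returnitem := h.getD 0 0
      let h2 := h.set 0 lastelt
      (returnitem, siftupGo h2.length h2 0 0 (h2.getD 0 0))
    else (lastelt, h)

def loopA (pQ : List Int) : Nat → List Int
  | 0 => pQ
  | n + 1 =>
    let p1 := heappop pQ
    let p2 := heappop p1.2
    loopA (heappush (heappush p2.2 (p1.1 + p2.1)) (p1.1 + p2.1)) n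

def solution (ability : List Int) (number : Int) : Int :=
  let pQ := ability.foldl (fun q x => heappush q x) []
  (loopA pQ number.toNat).sum

-- ===== PORT B =====
-- i = 0; while i < len(rest) and rest[i] < s: i += 1
def lowerCount (s : Int) : List Int → Nat
  | [] => 0
  | x :: xs => if x < s then lowerCount s xs + 1 else 0

-- one iteration of B's loop: s = pool[0]+pool[1]; rest = pool[2:]; pool = rest[:i] + [s, s] + rest[i:]
def stepB (pool : List Int) : List Int :=
  let s := pool.getD 0 0 + pool.getD 1 0
  let rest := pool.drop 2
  let i := lowerCount s rest
  rest.take i ++ s :: s :: rest.drop i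

def loopB (pool : List Int) : Nat → List Int
  | 0 => pool
  | n + 1 => loopB (stepB pool) n

def solution_alt (ability : List Int) (number : Int) : Int :=
  (loopB (PySem.List.sorted ability (fun x => x) false) number.toNat).sum

-- ===== PRECONDITION & SPEC =====
-- Pre_ excludes exactly the inputs where A raises IndexError: a positive number of rounds with
-- fewer than two abilities (heappop on an empty/1-element heap underflows; B raises there too).
def Pre_solution (ability : List Int) (number : Int) : Prop := number ≤ 0 ∨ 2 ≤ ability.length
instance (ability : List Int) (number : Int) : Decidable (Pre_solution ability number) := by unfold Pre_solution; infer_instance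
def pvWitness_solution : List Int × Int := ([1, 2, 3], 2)

def Spec_solution (ability : List Int) (number : Int) (out : Int) : Prop := out = solution_alt ability number
instance (ability : List Int) (number : Int) (out : Int) : Decidable (Spec_solution ability number out) := by unfold Spec_solution; infer_instance

-- ===== CLAIM (what is proved, stated in full; the proofs are below) =====
def Claim_equal_solution : Prop := ∀ (ability : List Int) (number : Int), Dom_solution ability number → Pre_solution ability number → Spec_solution ability number (solution ability number)

-- ===== LEMMAS AND PROOFS =====

-- getD / set basics
theorem pv_getD_set_self (l : List Int) (i : Nat) (v : Int) (h : i < l.length) :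
    (l.set i v).getD i 0 = v := by
  simp [List.getD_eq_getElem?_getD, h]

theorem pv_getD_set_ne (l : List Int) (i j : Nat) (v : Int) (h : i ≠ j) :
    (l.set i v).getD j 0 = l.getD j 0 := by
  simp [List.getD_eq_getElem?_getD, List.getElem?_set_ne h]

theorem pv_set_getD_self (l : List Int) (i : Nat) (h : i < l.length) :
    l.set i (l.getD i 0) = l := by
  rw [List.getD_eq_getElem l 0 h]; exact List.set_getElem_self h

theorem pv_getD_mem (l : List Int) (i : Nat) (h : i < l.length) : l.getD i 0 ∈ l := by
  rw [List.getD_eq_getElem l 0 h]; exact l.getElem_mem h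

-- permutation basics for set / eraseIdx
theorem pv_perm_set (l : List Int) (i : Nat) (v : Int) (h : i < l.length) :
    (l.set i v).Perm (v :: l.eraseIdx i) := by
  induction l generalizing i with
  | nil => simp at h
  | cons x xs ih =>
    cases i with
    | zero => simp
    | succ j =>
      simp only [List.set_cons_succ, List.eraseIdx_cons_succ]
      exact ((ih j (by simpa using h)).cons x).trans (List.Perm.swap v x _)

theorem pv_perm_eraseIdx (l : List Int) (i : Nat) (h : i < l.length) :
    l.Perm (l.getD i 0 :: l.eraseIdx i) := by
  have := pv_perm_set l i (l.getD i 0) h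
  rwa [pv_set_getD_self l i h] at this

-- moving a value from slot j into slot i and overwriting slot j is, up to permutation, writing into slot i
theorem pv_set_set_swap_perm (l : List Int) (i j : Nat) (x : Int)
    (hij : i ≠ j) (hi : i < l.length) (hj : j < l.length) :
    ((l.set i (l.getD j 0)).set j x).Perm (l.set i x) := by
  set w := l.getD j 0 with hw
  have hB : (l.set i w).getD j 0 = w := by rw [pv_getD_set_ne l i j w hij]
  have h1 : ((l.set i w).set j x).Perm (x :: (l.set i w).eraseIdx j) :=
    pv_perm_set _ j x (by simpa using hj)
  have h2 : (l.set i x) = ((l.set i w).set i x) := by rw [List.set_set]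
  have h3 : ((l.set i w).set i x).Perm (x :: (l.set i w).eraseIdx i) :=
    pv_perm_set _ i x (by simpa using hi)
  -- (l.set i w) has value w at both i and j, so erasing at i or at j is the same multiset
  have h4 : (l.set i w).getD i 0 = w := pv_getD_set_self l i w hi
  have h5 : ((l.set i w).eraseIdx j).Perm ((l.set i w).eraseIdx i) := by
    have e1 := pv_perm_eraseIdx (l.set i w) j (by simpa using hj)
    have e2 := pv_perm_eraseIdx (l.set i w) i (by simpa using hi)
    rw [hB] at e1; rw [h4] at e2
    exact (e1.symm.trans e2).cons_inv
  exact (h1.trans (h5.cons x)).trans (h3.symm.trans (by rw [← h2]))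

-- ===== siftdown: permutation =====
theorem siftdownGo_perm (fuel : Nat) : ∀ (l : List Int) (s p : Nat) (x : Int), p ≤ fuel → p < l.length →
    (siftdownGo fuel l s p x).Perm (l.set p x) := by
  induction fuel with
  | zero => intro l s p x hf hp; simp only [siftdownGo]; exact List.Perm.refl _
  | succ fuel ih =>
    intro l s p x hf hp
    simp only [siftdownGo]
    by_cases h1 : s < p
    · rw [if_pos h1]
      by_cases h2 : x < l.getD ((p - 1) / 2) 0
      · rw [if_pos h2]
        have hrec := ih (l.set p (l.getD ((p - 1) / 2) 0)) s ((p - 1) / 2) x (by omega)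
          (by simp only [List.length_set]; omega)
        exact hrec.trans (pv_set_set_swap_perm l p ((p - 1) / 2) x (by omega) hp (by omega))
      · rw [if_neg h2]
    · rw [if_neg h1]

theorem siftupGo_perm_aux (fuel : Nat) : ∀ (l : List Int) (s p : Nat) (x : Int),
    l.length - p ≤ fuel → p < l.length → (siftupGo fuel l s p x).Perm (l.set p x) := by
  induction fuel with
  | zero =>
    intro l s p x hn hp
    simp only [siftupGo]
    have h1 : ¬ (2 * p + 1 < l.length) := by omega
    have := siftdownGo_perm p (l.set p x) s p x (le_refl p) (by simp only [List.length_set]; exact hp)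
    rwa [List.set_set] at this
  | succ fuel ih =>
    intro l s p x hn hp
    simp only [siftupGo]
    by_cases h1 : 2 * p + 1 < l.length
    · rw [if_pos h1]
      by_cases h2 : 2 * p + 1 + 1 < l.length ∧ ¬ (l.getD (2 * p + 1) 0 < l.getD (2 * p + 1 + 1) 0)
      · rw [if_pos h2]
        have hc : 2 * p + 2 < l.length := by omega
        have hrec := ih (l.set p (l.getD (2 * p + 1 + 1) 0)) s (2 * p + 1 + 1) x
          (by simp only [List.length_set]; omega) (by simp only [List.length_set]; omega)
        exact hrec.trans (pv_set_set_swap_perm l p (2 * p + 1 + 1) x (by omega) hp (by omega))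
      · rw [if_neg h2]
        have hrec := ih (l.set p (l.getD (2 * p + 1) 0)) s (2 * p + 1) x
          (by simp only [List.length_set]; omega) (by simp only [List.length_set]; omega)
        exact hrec.trans (pv_set_set_swap_perm l p (2 * p + 1) x (by omega) hp (by omega))
    · rw [if_neg h1]
      have := siftdownGo_perm p (l.set p x) s p x (le_refl p) (by simp only [List.length_set]; exact hp)
      rwa [List.set_set] at this

theorem siftupGo_perm (l : List Int) (s p : Nat) (x : Int) (hp : p < l.length) :
    (siftupGo l.length l s p x).Perm (l.set p x) :=
  siftupGo_perm_aux l.length l s p x (by omega) hp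

-- ===== heap invariant =====
def HeapInv (l : List Int) : Prop :=
  ∀ i, 0 < i → i < l.length → l.getD ((i - 1) / 2) 0 ≤ l.getD i 0

theorem heap_root_le (l : List Int) (h : HeapInv l) :
    ∀ i, i < l.length → l.getD 0 0 ≤ l.getD i 0 := by
  intro i
  induction i using Nat.strong_induction_on with
  | _ i ih =>
    intro hi
    rcases Nat.eq_zero_or_pos i with h0 | h0
    · subst h0; exact le_refl _
    · exact le_trans (ih ((i - 1) / 2) (by omega) (by omega)) (h i h0 hi)

theorem heap_head_le_mem (l : List Int) (h : HeapInv l) :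
    ∀ x ∈ l, l.getD 0 0 ≤ x := by
  intro x hx
  obtain ⟨i, hi, rfl⟩ := List.mem_iff_getElem.mp hx
  rw [← List.getD_eq_getElem l 0 hi]
  exact heap_root_le l h i hi

theorem siftdownGo_heapInv (fuel : Nat) : ∀ (l : List Int) (p : Nat) (x : Int), p ≤ fuel → p < l.length →
    (∀ i, 0 < i → i < l.length → i ≠ p →
      (l.set p x).getD ((i - 1) / 2) 0 ≤ (l.set p x).getD i 0) →
    (∀ j, 0 < j → j < l.length → (j - 1) / 2 = p → 0 < p →
      l.getD ((p - 1) / 2) 0 ≤ l.getD j 0) →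
    HeapInv (siftdownGo fuel l 0 p x) := by
  induction fuel with
  | zero =>
    intro l p x hf hp ha hb
    simp only [siftdownGo]
    intro i hi0 hilen
    rw [List.length_set] at hilen
    exact ha i hi0 hilen (by omega)
  | succ fuel ih =>
    intro l p x hf hp ha hb
    simp only [siftdownGo]
    by_cases h1 : 0 < p
    · rw [if_pos h1]
      by_cases h2 : x < l.getD ((p - 1) / 2) 0
      · rw [if_pos h2]
        refine ih (l.set p (l.getD ((p - 1) / 2) 0)) ((p - 1) / 2) x (by omega)
          (by simp only [List.length_set]; omega) ?_ ?_
        · -- edges of the new virtual array, hole moved up to (p-1)/2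
          intro i hi0 hilen hine
          rw [List.length_set] at hilen
          have hplen : (p - 1) / 2 < l.length := by omega
          by_cases hip : i = p
          · subst hip
            have e1 : ((l.set i (l.getD ((i - 1) / 2) 0)).set ((i - 1) / 2) x).getD ((i - 1) / 2) 0 = x :=
              pv_getD_set_self _ _ _ (by simp only [List.length_set]; omega)
            have e2 : ((l.set i (l.getD ((i - 1) / 2) 0)).set ((i - 1) / 2) x).getD i 0
                = l.getD ((i - 1) / 2) 0 := by
              rw [pv_getD_set_ne _ _ _ _ (by omega), pv_getD_set_self _ _ _ hp]
            rw [e1, e2]; exact le_of_lt h2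
          · by_cases hpar : (i - 1) / 2 = p
            · have hig : p < i := by omega
              have e1 : ((l.set p (l.getD ((p - 1) / 2) 0)).set ((p - 1) / 2) x).getD ((i - 1) / 2) 0
                  = l.getD ((p - 1) / 2) 0 := by
                rw [hpar, pv_getD_set_ne _ _ _ _ (by omega), pv_getD_set_self _ _ _ hp]
              have e2 : ((l.set p (l.getD ((p - 1) / 2) 0)).set ((p - 1) / 2) x).getD i 0
                  = l.getD i 0 := by
                rw [pv_getD_set_ne _ _ _ _ (by omega), pv_getD_set_ne _ _ _ _ (by omega)]
              rw [e1, e2]; exact hb i hi0 hilen hpar h1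
            · by_cases hpp : (i - 1) / 2 = (p - 1) / 2
              · have e1 : ((l.set p (l.getD ((p - 1) / 2) 0)).set ((p - 1) / 2) x).getD ((i - 1) / 2) 0
                    = x := by rw [hpp]; exact pv_getD_set_self _ _ _ (by simp only [List.length_set]; omega)
                have e2 : ((l.set p (l.getD ((p - 1) / 2) 0)).set ((p - 1) / 2) x).getD i 0
                    = l.getD i 0 := by
                  rw [pv_getD_set_ne _ _ _ _ (by omega), pv_getD_set_ne _ _ _ _ (by omega)]
                have hai := ha i hi0 hilen hip
                rw [pv_getD_set_ne _ _ _ _ (by omega), pv_getD_set_ne _ _ _ _ (by omega), hpp] at hai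
                rw [e1, e2]
                exact le_trans (le_of_lt h2) hai
              · have e1 : ((l.set p (l.getD ((p - 1) / 2) 0)).set ((p - 1) / 2) x).getD ((i - 1) / 2) 0
                    = l.getD ((i - 1) / 2) 0 := by
                  rw [pv_getD_set_ne _ _ _ _ (fun h => hpp h.symm), pv_getD_set_ne _ _ _ _ (fun h => hpar h.symm)]
                have e2 : ((l.set p (l.getD ((p - 1) / 2) 0)).set ((p - 1) / 2) x).getD i 0
                    = l.getD i 0 := by
                  rw [pv_getD_set_ne _ _ _ _ (by omega), pv_getD_set_ne _ _ _ _ (by omega)]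
                have hai := ha i hi0 hilen hip
                rw [pv_getD_set_ne _ _ _ _ (fun h => hpar h.symm), pv_getD_set_ne _ _ _ _ (by omega)] at hai
                rw [e1, e2]; exact hai
        · -- children of the new hole position
          intro j hj0 hjlen hjpar hpp0
          rw [List.length_set] at hjlen
          have hgp : ((p - 1) / 2 - 1) / 2 ≠ p := by omega
          rw [pv_getD_set_ne _ _ _ _ (fun h => hgp h.symm)]
          by_cases hjp : j = p
          · rw [hjp, pv_getD_set_self _ _ _ hp]
            have hap := ha ((p - 1) / 2) hpp0 (by omega) (by omega)
            rwa [pv_getD_set_ne _ _ _ _ (by omega), pv_getD_set_ne _ _ _ _ (by omega)] at hap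
          · rw [pv_getD_set_ne _ _ _ _ (fun h => hjp h.symm)]
            have hap := ha ((p - 1) / 2) hpp0 (by omega) (by omega)
            rw [pv_getD_set_ne _ _ _ _ (by omega), pv_getD_set_ne _ _ _ _ (by omega)] at hap
            have haj := ha j hj0 hjlen hjp
            rw [pv_getD_set_ne _ _ _ _ (by omega), pv_getD_set_ne _ _ _ _ (fun h => hjp h.symm), hjpar] at haj
            exact le_trans hap haj
      · rw [if_neg h2]
        intro i hi0 hilen
        rw [List.length_set] at hilen
        by_cases hip : i = p
        · subst hip
          rw [pv_getD_set_ne _ _ _ _ (by omega), pv_getD_set_self _ _ _ hp]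
          exact le_of_not_gt h2
        · exact ha i hi0 hilen hip
    · rw [if_neg h1]
      intro i hi0 hilen
      rw [List.length_set] at hilen
      exact ha i hi0 hilen (by omega)

theorem siftupGo_leaf_heapInv (l : List Int) (p : Nat) (x : Int) (hp : p < l.length)
    (h1 : ¬ (2 * p + 1 < l.length))
    (ha : ∀ j, 0 < j → j < l.length → j ≠ p → (j - 1) / 2 ≠ p →
      l.getD ((j - 1) / 2) 0 ≤ l.getD j 0) :
    HeapInv (siftdownGo p (l.set p x) 0 p x) := by
  refine siftdownGo_heapInv p (l.set p x) p x (le_refl p) (by simp only [List.length_set]; exact hp) ?_ ?_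
  · intro i hi0 hilen hip
    rw [List.length_set] at hilen
    rw [List.set_set]
    have hpari : (i - 1) / 2 ≠ p := by omega
    rw [pv_getD_set_ne _ _ _ _ (fun h => hpari h.symm),
      pv_getD_set_ne _ _ _ _ (fun h => hip h.symm)]
    exact ha i hi0 hilen hip hpari
  · intro j hj0 hjlen hjpar hp0
    rw [List.length_set] at hjlen
    omega

theorem siftupGo_heapInv_aux (fuel : Nat) : ∀ (l : List Int) (p : Nat) (x : Int),
    l.length - p ≤ fuel → p < l.length →
    (∀ j, 0 < j → j < l.length → j ≠ p → (j - 1) / 2 ≠ p →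
      l.getD ((j - 1) / 2) 0 ≤ l.getD j 0) →
    (∀ j, 0 < j → j < l.length → (j - 1) / 2 = p → 0 < p →
      l.getD ((p - 1) / 2) 0 ≤ l.getD j 0) →
    HeapInv (siftupGo fuel l 0 p x) := by
  induction fuel with
  | zero =>
    intro l p x hn hp ha hb
    simp only [siftupGo]
    exact siftupGo_leaf_heapInv l p x hp (by omega) ha
  | succ fuel ih =>
    intro l p x hn hp ha hb
    simp only [siftupGo]
    by_cases h1 : 2 * p + 1 < l.length
    · rw [if_pos h1]
      -- c is the chosen (smaller) child; lc its value; prove the two premises for the recursive call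
      have main : ∀ c : Nat, (c = 2 * p + 1 ∨ c = 2 * p + 2) → c < l.length →
          (∀ o, (o = 2 * p + 1 ∨ o = 2 * p + 2) → o ≠ c → o < l.length → l.getD c 0 ≤ l.getD o 0) →
          HeapInv (siftupGo fuel (l.set p (l.getD c 0)) 0 c x) := by
        intro c hc hclen hsm
        refine ih (l.set p (l.getD c 0)) c x (by simp only [List.length_set]; omega)
          (by simp only [List.length_set]; omega) ?_ ?_
        · intro j hj0 hjlen hjc hjparc
          rw [List.length_set] at hjlen
          by_cases hjp : j = p
          · subst hjp
            rw [pv_getD_set_ne _ _ _ _ (by omega), pv_getD_set_self _ _ _ hp]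
            exact hb c (by omega) hclen (by omega) (by omega)
          · by_cases hparp : (j - 1) / 2 = p
            · rw [hparp, pv_getD_set_self _ _ _ hp, pv_getD_set_ne _ _ _ _ (fun h => hjp h.symm)]
              exact hsm j (by omega) hjc hjlen
            · rw [pv_getD_set_ne _ _ _ _ (fun h => hparp h.symm),
                pv_getD_set_ne _ _ _ _ (fun h => hjp h.symm)]
              exact ha j hj0 hjlen hjp hparp
        · intro j hj0 hjlen hjparc hc0
          rw [List.length_set] at hjlen
          have hcparp : (c - 1) / 2 = p := by omega
          rw [hcparp, pv_getD_set_self _ _ _ hp,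
            pv_getD_set_ne _ _ _ _ (by omega)]
          have := ha j hj0 hjlen (by omega) (by omega)
          rwa [hjparc] at this
      by_cases h2 : 2 * p + 1 + 1 < l.length ∧ ¬ (l.getD (2 * p + 1) 0 < l.getD (2 * p + 1 + 1) 0)
      · rw [if_pos h2]
        refine main (2 * p + 1 + 1) (by omega) (by omega) ?_
        intro o ho hoc holen
        have : o = 2 * p + 1 := by omega
        subst this
        exact le_of_not_gt h2.2
      · rw [if_neg h2]
        refine main (2 * p + 1) (by omega) h1 ?_
        intro o ho hoc holen
        have : o = 2 * p + 2 := by omega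
        subst this
        have hlt : l.getD (2 * p + 1) 0 < l.getD (2 * p + 1 + 1) 0 := by
          by_contra hno
          exact h2 ⟨by omega, hno⟩
        exact le_of_lt hlt
    · rw [if_neg h1]
      exact siftupGo_leaf_heapInv l p x hp h1 ha
theorem siftupGo_heapInv (l : List Int) (p : Nat) (x : Int) (hp : p < l.length)
    (ha : ∀ j, 0 < j → j < l.length → j ≠ p → (j - 1) / 2 ≠ p →
      l.getD ((j - 1) / 2) 0 ≤ l.getD j 0)
    (hb : ∀ j, 0 < j → j < l.length → (j - 1) / 2 = p → 0 < p →
      l.getD ((p - 1) / 2) 0 ≤ l.getD j 0) :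
    HeapInv (siftupGo l.length l 0 p x) :=
  siftupGo_heapInv_aux l.length l p x (by omega) hp ha hb

-- ===== heappush / heappop specs =====
theorem pv_getD_append (l t : List Int) (j : Nat) (hj : j < l.length) :
    (l ++ t).getD j 0 = l.getD j 0 := by
  rw [List.getD_eq_getElem?_getD, List.getD_eq_getElem?_getD, List.getElem?_append_left hj]

theorem pv_getD_dropLast (l : List Int) (i : Nat) (hi : i < l.length - 1) :
    (l.dropLast).getD i 0 = l.getD i 0 := by
  rw [List.getD_eq_getElem?_getD, List.getD_eq_getElem?_getD, List.getElem?_dropLast]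
  simp [hi]

theorem pv_concat_set_last (l : List Int) (x : Int) :
    (l ++ [x]).set l.length x = l ++ [x] := by
  have hp : l.length < (l ++ [x]).length := by simp
  have hg : (l ++ [x]).getD l.length 0 = x := by
    rw [List.getD_eq_getElem?_getD, List.getElem?_append_right (le_refl l.length)]
    simp
  have hs := pv_set_getD_self (l ++ [x]) l.length hp
  rw [hg] at hs
  exact hs

theorem heappush_perm (l : List Int) (x : Int) : (heappush l x).Perm (x :: l) := by
  unfold heappush
  have hlen : (l ++ [x]).length - 1 = l.length := by simp
  rw [hlen]
  have hp : l.length < (l ++ [x]).length := by simp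
  have h1 := siftdownGo_perm l.length (l ++ [x]) 0 l.length x (le_refl _) hp
  rw [pv_concat_set_last] at h1
  exact h1.trans (List.perm_append_singleton x l)

theorem heappush_heapInv (l : List Int) (x : Int) (h : HeapInv l) : HeapInv (heappush l x) := by
  unfold heappush
  have hlen : (l ++ [x]).length - 1 = l.length := by simp
  rw [hlen]
  have hp : l.length < (l ++ [x]).length := by simp
  refine siftdownGo_heapInv l.length (l ++ [x]) l.length x (le_refl _) hp ?_ ?_
  · intro i hi0 hilen hip
    rw [List.length_append] at hilen
    have hil : i < l.length := by simp at hilen; omega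
    rw [pv_concat_set_last, pv_getD_append _ _ _ (by omega), pv_getD_append _ _ _ hil]
    exact h i hi0 hil
  · intro j hj0 hjlen hjpar hp0
    rw [List.length_append] at hjlen
    simp at hjlen
    omega

theorem heappop_eq (l : List Int) (hl : 2 ≤ l.length) :
    heappop l = (l.getD 0 0,
      siftupGo ((l.dropLast).set 0 (l.getD (l.length - 1) 0)).length
        ((l.dropLast).set 0 (l.getD (l.length - 1) 0)) 0 0 (l.getD (l.length - 1) 0)) := by
  have h1 : l.getLast? = some (l.getD (l.length - 1) 0) := by
    rw [List.getLast?_eq_getElem?, List.getD_eq_getElem l 0 (by omega)]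
    exact List.getElem?_eq_getElem (by omega)
  have hpos : 0 < l.dropLast.length := by rw [List.length_dropLast]; omega
  unfold heappop
  rw [h1]
  simp only [gt_iff_lt, hpos, if_pos]
  rw [pv_getD_set_self _ _ _ hpos, pv_getD_dropLast l 0 (by omega)]

theorem heappop_fst (l : List Int) (h : l ≠ []) : (heappop l).1 = l.getD 0 0 := by
  rcases Nat.lt_or_ge l.length 2 with h2 | h2
  · cases l with
    | nil => exact absurd rfl h
    | cons a t =>
      cases t with
      | nil => simp [heappop]
      | cons b r => simp [List.length_cons] at h2
  · rw [heappop_eq l h2]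

theorem pv_perm_getLast (t : List Int) (h : t ≠ []) : t.Perm (t.getLast h :: t.dropLast) := by
  conv_lhs => rw [← List.dropLast_append_getLast h]
  exact List.perm_append_singleton _ _

theorem heappop_perm (l : List Int) (h : l ≠ []) : l.Perm ((heappop l).1 :: (heappop l).2) := by
  rcases Nat.lt_or_ge l.length 2 with h2 | h2
  · cases l with
    | nil => exact absurd rfl h
    | cons a t =>
      cases t with
      | nil => simp [heappop]
      | cons b r => simp [List.length_cons] at h2
  · rw [heappop_eq l h2]
    cases l with
    | nil => simp at h2
    | cons a t =>
      have ht : t ≠ [] := by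
        intro hh
        rw [hh] at h2
        simp at h2
      have hdl : (a :: t).dropLast = a :: t.dropLast := List.dropLast_cons_of_ne_nil ht
      have hlast : (a :: t).getD ((a :: t).length - 1) 0 = t.getLast ht := by
        rw [List.getD_eq_getElem _ 0 (by simp), List.getLast_eq_getElem]
        have hix : (a :: t).length - 1 = t.length - 1 + 1 := by
          have hlp : 0 < t.length := List.length_pos_of_ne_nil ht
          simp only [List.length_cons]
          omega
        simp only [hix, List.getElem_cons_succ]
      rw [hlast, hdl]
      have hset : (a :: t.dropLast).set 0 (t.getLast ht) = t.getLast ht :: t.dropLast := rfl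
      rw [hset]
      have hperm2 := siftupGo_perm (t.getLast ht :: t.dropLast) 0 0 (t.getLast ht) (by simp)
      have hset2 : (t.getLast ht :: t.dropLast).set 0 (t.getLast ht) = t.getLast ht :: t.dropLast := rfl
      rw [hset2] at hperm2
      have hgd : (a :: t).getD 0 0 = a := rfl
      show (a :: t).Perm ((a :: t).getD 0 0 ::
        siftupGo (t.getLast ht :: t.dropLast).length (t.getLast ht :: t.dropLast) 0 0 (t.getLast ht))
      rw [hgd]
      exact ((pv_perm_getLast t ht).cons a).trans ((hperm2.symm).cons a)

theorem heappop_heapInv (l : List Int) (h : HeapInv l) (hne : l ≠ []) : HeapInv (heappop l).2 := by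
  rcases Nat.lt_or_ge l.length 2 with h2 | h2
  · cases l with
    | nil => exact absurd rfl hne
    | cons a t =>
      cases t with
      | nil =>
        have he : (heappop [a]).2 = [] := by simp [heappop]
        rw [he]; intro i hi0 hilen; simp at hilen
      | cons b r => simp [List.length_cons] at h2
  · rw [heappop_eq l h2]
    have hlen2 : ((l.dropLast).set 0 (l.getD (l.length - 1) 0)).length = l.length - 1 := by
      simp
    refine siftupGo_heapInv _ 0 _ (by omega) ?_ ?_
    · intro j hj0 hjlen hjne hjpar
      rw [hlen2] at hjlen
      rw [pv_getD_set_ne _ _ _ _ (fun hh => hjpar hh.symm),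
        pv_getD_set_ne _ _ _ _ (fun hh => hjne hh.symm),
        pv_getD_dropLast l _ (by omega), pv_getD_dropLast l _ (by omega)]
      exact h j hj0 (by omega)
    · intro j hj0 hjlen hjpar hp0
      exact absurd hp0 (lt_irrefl 0)

-- ===== B-side: sorted insertion =====
theorem stepB_insert_spec (s : Int) (l : List Int) (hl : l.Pairwise (· ≤ ·)) :
    (l.take (lowerCount s l) ++ s :: s :: l.drop (lowerCount s l)).Pairwise (· ≤ ·) ∧
    (l.take (lowerCount s l) ++ s :: s :: l.drop (lowerCount s l)).Perm (s :: s :: l) := by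
  induction l with
  | nil => simp [lowerCount]
  | cons x xs ih =>
    have hx : ∀ y ∈ xs, x ≤ y := (List.pairwise_cons.mp hl).1
    have hxs : xs.Pairwise (· ≤ ·) := (List.pairwise_cons.mp hl).2
    by_cases hlt : x < s
    · obtain ⟨ihs, ihp⟩ := ih hxs
      simp only [lowerCount, if_pos hlt, List.take_succ_cons, List.drop_succ_cons,
        List.cons_append]
      constructor
      · refine List.pairwise_cons.mpr ⟨?_, ihs⟩
        intro y hy
        have hmem : y = s ∨ y = s ∨ y ∈ xs := by simpa using ihp.mem_iff.mp hy
        rcases hmem with h | h | h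
        · exact le_of_lt (h ▸ hlt)
        · exact le_of_lt (h ▸ hlt)
        · exact hx y h
      · exact (ihp.cons x).trans ((List.Perm.swap s x _).trans ((List.Perm.swap s x _).cons s))
    · simp only [lowerCount, if_neg hlt, List.take_zero, List.drop_zero, List.nil_append]
      refine ⟨?_, List.Perm.refl _⟩
      have hsx : s ≤ x := le_of_not_gt hlt
      refine List.pairwise_cons.mpr ⟨?_, List.pairwise_cons.mpr ⟨?_, hl⟩⟩
      · intro y hy
        have hmem : y = s ∨ y = x ∨ y ∈ xs := by simpa using hy
        rcases hmem with h | h | h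
        · exact le_of_eq h.symm
        · exact h ▸ hsx
        · exact le_trans hsx (hx y h)
      · intro y hy
        have hmem : y = x ∨ y ∈ xs := by simpa using hy
        rcases hmem with h | h
        · exact h ▸ hsx
        · exact le_trans hsx (hx y h)

theorem stepB_spec (p0 p1 : Int) (rest : List Int)
    (hs : (p0 :: p1 :: rest).Pairwise (· ≤ ·)) :
    (stepB (p0 :: p1 :: rest)).Pairwise (· ≤ ·) ∧
    (stepB (p0 :: p1 :: rest)).Perm ((p0 + p1) :: (p0 + p1) :: rest) := by
  have hrest : rest.Pairwise (· ≤ ·) :=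
    ((List.pairwise_cons.mp (List.pairwise_cons.mp hs).2).2)
  simpa [stepB] using stepB_insert_spec (p0 + p1) rest hrest

-- ===== main loop =====
theorem loop_perm : ∀ n (q pool : List Int), HeapInv q → q.Perm pool →
    pool.Pairwise (· ≤ ·) → (2 ≤ pool.length ∨ n = 0) →
    (loopA q n).Perm (loopB pool n) := by
  intro n
  induction n with
  | zero => intro q pool _ hperm _ _; simpa [loopA, loopB] using hperm
  | succ n ih =>
    intro q pool hinv hperm hpair hside
    have hlen : 2 ≤ pool.length := by
      rcases hside with hh | hh
      · exact hh
      · omega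
    cases pool with
    | nil => simp at hlen
    | cons p0 t =>
      cases t with
      | nil => simp at hlen
      | cons p1 rest =>
        have hql : q.length = rest.length + 2 := by
          have := hperm.length_eq; simpa using this
        have hqne : q ≠ [] := by
          intro hh; rw [hh] at hql; simp at hql
        have hf1 := heappop_fst q hqne
        have hperm1 := heappop_perm q hqne
        have hinv1 := heappop_heapInv q hinv hqne
        have hr1 : (heappop q).1 = p0 := by
          rw [hf1]
          apply le_antisymm
          · exact heap_head_le_mem q hinv p0 (hperm.mem_iff.mpr (by simp))
          · have hmem0 : q.getD 0 0 ∈ q := pv_getD_mem q 0 (by omega)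
            have hm := hperm.mem_iff.mp hmem0
            rcases List.mem_cons.mp hm with hh | hh
            · exact le_of_eq hh.symm
            · exact (List.pairwise_cons.mp hpair).1 _ hh
        have hq1 : (heappop q).2.Perm (p1 :: rest) := by
          have hh := hperm1.symm.trans hperm
          rw [hr1] at hh
          exact hh.cons_inv
        have hq1len : (heappop q).2.length = rest.length + 1 := by
          simpa using hq1.length_eq
        have hq1ne : (heappop q).2 ≠ [] := by
          intro hh; rw [hh] at hq1len; simp at hq1len
        have hf2 := heappop_fst _ hq1ne
        have hperm2 := heappop_perm _ hq1ne
        have hinv2 := heappop_heapInv _ hinv1 hq1ne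
        have hpair1 : (p1 :: rest).Pairwise (· ≤ ·) := (List.pairwise_cons.mp hpair).2
        have hr2 : (heappop (heappop q).2).1 = p1 := by
          rw [hf2]
          apply le_antisymm
          · exact heap_head_le_mem _ hinv1 p1 (hq1.mem_iff.mpr (by simp))
          · have hmem : (heappop q).2.getD 0 0 ∈ (heappop q).2 := pv_getD_mem _ 0 (by omega)
            have hm := hq1.mem_iff.mp hmem
            rcases List.mem_cons.mp hm with hh | hh
            · exact le_of_eq hh.symm
            · exact (List.pairwise_cons.mp hpair1).1 _ hh
        have hq2 : (heappop (heappop q).2).2.Perm rest := by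
          have hh := hperm2.symm.trans hq1
          rw [hr2] at hh
          exact hh.cons_inv
        obtain ⟨hsorted', hpermB⟩ := stepB_spec p0 p1 rest hpair
        have hpushinv : HeapInv (heappush (heappush (heappop (heappop q).2).2 (p0 + p1)) (p0 + p1)) :=
          heappush_heapInv _ _ (heappush_heapInv _ _ hinv2)
        have hpushperm : (heappush (heappush (heappop (heappop q).2).2 (p0 + p1)) (p0 + p1)).Perm
            (stepB (p0 :: p1 :: rest)) := by
          refine ((heappush_perm _ _).trans ?_).trans hpermB.symm
          exact ((heappush_perm _ _).trans (hq2.cons _)).cons _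
        have hlenB : 2 ≤ (stepB (p0 :: p1 :: rest)).length := by
          rw [hpermB.length_eq]; simp
        simp only [loopA, loopB]
        rw [hr1, hr2]
        exact ih _ _ hpushinv hpushperm hsorted' (Or.inl hlenB)

theorem build_heap_aux : ∀ (xs acc : List Int), HeapInv acc →
    HeapInv (xs.foldl (fun q x => heappush q x) acc) ∧
    (xs.foldl (fun q x => heappush q x) acc).Perm (acc ++ xs) := by
  intro xs
  induction xs with
  | nil => intro acc h; exact ⟨h, by simp⟩
  | cons x xs ih =>
    intro acc h
    obtain ⟨h1, h2⟩ := ih (heappush acc x) (heappush_heapInv acc x h)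
    refine ⟨by simpa using h1, ?_⟩
    simp only [List.foldl_cons]
    refine h2.trans ?_
    have hap : ((heappush acc x) ++ xs).Perm ((x :: acc) ++ xs) :=
      (heappush_perm acc x).append_right xs
    exact hap.trans List.perm_middle.symm

theorem build_heap (ability : List Int) :
    HeapInv (ability.foldl (fun q x => heappush q x) []) ∧
    (ability.foldl (fun q x => heappush q x) []).Perm ability := by
  have h0 : HeapInv ([] : List Int) := by intro i hi0 hilen; simp at hilen
  obtain ⟨h1, h2⟩ := build_heap_aux ability [] h0
  exact ⟨h1, by simpa using h2⟩

-- ===== VERDICT (by name: the statement is the Claim_ definition above) =====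
theorem solution_spec : Claim_equal_solution := by
  intro ability number _dom hpre
  unfold Spec_solution solution solution_alt
  obtain ⟨hinv, hperm⟩ := build_heap ability
  have hsp : (PySem.List.sorted ability (fun x => x) false).Perm ability :=
    PySem.List.sorted_perm ability (fun x => x) false
  have hpair : (PySem.List.sorted ability (fun x => x) false).Pairwise (· ≤ ·) := by
    have := PySem.List.sorted_pairwise (xs := ability) (key := fun x => x)
    simpa using this
  have hqp : (ability.foldl (fun q x => heappush q x) []).Perm
      (PySem.List.sorted ability (fun x => x) false) := hperm.trans hsp.symm
  have hside : 2 ≤ (PySem.List.sorted ability (fun x => x) false).length ∨ number.toNat = 0 := by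
    rcases hpre with h | h
    · right; omega
    · left; rw [hsp.length_eq]; exact h
  exact (loop_perm number.toNat _ _ hinv hqp hpair hside).sum_eq
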